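-- pv_equiv track=rewrite | github.com/GrahamStrickland/epi | test/arrays/test_dutch_national_flag_bool_values.py | is_partitioned
-- ===== SOURCE A (Python) =====
-- def is_partitioned(A: list[int]) -> bool:
--     first_section = True
--     for key in A:
--         if first_section and key:
--             first_section = False
--         if not first_section and not key:
--             return False
--     return True
-- ===== SOURCE B (Python) =====
-- def is_partitioned(A: list[int]) -> bool:
--     bs = [bool(x) for x in A]
--     return bs == sorted(bs)
-- ===== Notes on version B (the rewrite author's own statement) =====
-- stated objective: simpler
-- what changed: Replaces the single-pass first_section state machine with mapping each element to its truthiness and checking that the boolean sequence equals its sorted version (non-decreasing = falsy block then truthy block).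
import Mathlib
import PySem

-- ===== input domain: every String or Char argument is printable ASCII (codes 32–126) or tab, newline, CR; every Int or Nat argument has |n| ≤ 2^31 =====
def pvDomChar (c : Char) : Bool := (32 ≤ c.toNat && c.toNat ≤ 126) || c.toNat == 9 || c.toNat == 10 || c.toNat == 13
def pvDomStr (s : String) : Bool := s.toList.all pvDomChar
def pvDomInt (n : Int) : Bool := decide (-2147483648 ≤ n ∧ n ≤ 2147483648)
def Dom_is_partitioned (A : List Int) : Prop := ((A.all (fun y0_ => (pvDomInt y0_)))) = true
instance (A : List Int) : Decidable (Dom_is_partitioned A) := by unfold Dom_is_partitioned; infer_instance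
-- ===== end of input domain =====

-- ===== PORT A =====
-- B replaces A's first_section state machine by a map-to-truthiness + sorted comparison (objective: simpler).
-- Port of A: the for-loop with early return becomes structural recursion on the list carrying first_section.
def isPartGo : List Int → Bool → Bool
  | [], _ => true
  | key :: rest, firstSection =>
    let fs1 := if firstSection = true ∧ key ≠ 0 then false else firstSection
    if fs1 = false ∧ key = 0 then false else isPartGo rest fs1

def is_partitioned (A : List Int) : Bool := isPartGo A true

-- ===== PORT B =====
def is_partitioned_alt (A : List Int) : Bool :=
  let bs := A.map (fun x => decide (x ≠ 0))
  decide (bs = PySem.List.sorted bs (fun b => b) false)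

-- ===== PRECONDITION & SPEC =====
def Spec_is_partitioned (A : List Int) (out : Bool) : Prop := out = is_partitioned_alt A
instance (A : List Int) (out : Bool) : Decidable (Spec_is_partitioned A out) := by unfold Spec_is_partitioned; infer_instance

-- ===== CLAIM (what is proved, stated in full; the proofs are below) =====
def Claim_equal_is_partitioned : Prop := ∀ (A : List Int), Dom_is_partitioned A → Spec_is_partitioned A (is_partitioned A)

-- ===== LEMMAS AND PROOFS =====

-- a Bool list equals its sorted version iff it is non-decreasing
theorem sorted_bool_iff (bs : List Bool) :
    (bs = PySem.List.sorted bs (fun b => b) false) ↔ bs.Pairwise (· ≤ ·) := by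
  constructor
  · intro h
    have := PySem.List.sorted_pairwise (xs := bs) (key := fun b => b)
    rw [← h] at this
    simpa using this
  · intro h
    exact (PySem.List.sorted_eq_self_of_pairwise (xs := bs) (key := fun b => b) (by simpa using h)).symm

-- once first_section is False, A succeeds iff every remaining element is truthy
theorem isPartGo_false (l : List Int) :
    isPartGo l false = l.all (fun x => decide (x ≠ 0)) := by
  induction l with
  | nil => rfl
  | cons k rest ih =>
    by_cases hk : k = 0 <;> simp [isPartGo, hk, ih]

theorem isPartGo_true (l : List Int) :
    isPartGo l true = decide ((l.map (fun x => decide (x ≠ 0))).Pairwise (· ≤ ·)) := by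
  induction l with
  | nil => rfl
  | cons k rest ih =>
    by_cases hk : k = 0
    · -- falsy head: state unchanged, head imposes no constraint
      simp [isPartGo, hk, ih]
    · -- truthy head: first_section flips; A succeeds iff every remaining element is truthy
      have hstep : isPartGo (k :: rest) true = isPartGo rest false := by
        simp [isPartGo, hk]
      rw [hstep, isPartGo_false]
      have hiff : (rest.all fun x => decide (x ≠ 0)) = true ↔
          List.Pairwise (fun a b => a ≤ b)
            (List.map (fun x => decide (x ≠ 0)) (k :: rest)) := by
        rw [List.all_eq_true]
        simp only [List.map_cons, List.pairwise_cons, decide_eq_true_eq]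
        constructor
        · intro h
          constructor
          · intro b hb
            rcases List.mem_map.mp hb with ⟨x, hx, rfl⟩
            simp [h x hx, hk]
          · exact List.pairwise_of_forall_mem_list (fun a ha b hb => by
              rcases List.mem_map.mp ha with ⟨x, hx, rfl⟩
              rcases List.mem_map.mp hb with ⟨y, hy, rfl⟩
              simp [h x hx, h y hy])
        · intro h x hx
          have hle := h.1 (decide (x ≠ 0)) (List.mem_map.mpr ⟨x, hx, rfl⟩)
          intro hx0
          simp [hx0, hk] at hle
          exact absurd hle (by decide)
      exact Bool.eq_iff_iff.mpr (by rw [hiff, decide_eq_true_eq])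

-- ===== VERDICT (by name: the statement is the Claim_ definition above) =====
theorem is_partitioned_spec : Claim_equal_is_partitioned := by
  intro A _
  show is_partitioned A = is_partitioned_alt A
  rw [is_partitioned, isPartGo_true]
  show _ = decide (A.map (fun x => decide (x ≠ 0)) = PySem.List.sorted (A.map (fun x => decide (x ≠ 0))) (fun b => b) false)
  exact decide_eq_decide.mpr (sorted_bool_iff _).symm
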